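-- pv_equiv track=rewrite | github.com/omparmar1328/jarvis | bait/voice.py | strip_wake_word
-- ===== SOURCE A (Python) =====
-- def strip_wake_word(text: str, wake_words: list[str] = None) -> str:
--     """Remove the wake word prefix from the command."""
--     if wake_words is None:
--         wake_words = ["hey bait", "okay bait", "ok bait", "bait"]
--     text_lower = text.lower().strip()
--     for w in sorted(wake_words, key=len, reverse=True):
--         if text_lower.startswith(w):
--             return text[len(w):].strip(" ,.")
--     return text
-- ===== SOURCE B (Python) =====
-- def strip_wake_word(text: str, wake_words: list[str] = None) -> str:
--     """Remove the wake word prefix from the command."""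
--     if wake_words is None:
--         wake_words = ["hey bait", "okay bait", "ok bait", "bait"]
--     text_lower = text.lower().strip()
--     words = set(wake_words)
--     longest = max(map(len, wake_words), default=0)
--     for n in range(min(longest, len(text_lower)), -1, -1):
--         if text_lower[:n] in words:
--             return text[n:].strip(" ,.")
--     return text
-- ===== Notes on version B (the rewrite author's own statement) =====
-- stated objective: alternative
-- what changed: B iterates over candidate prefix LENGTHS (from min(longest wake word, len(text)) down to 0) and tests set membership of text_lower[:n], instead of A's sort-the-wake-words-by-length-then-scan-for-a-startswith-match; correct because equal-length prefixes of the same string coincide, so the longest matching wake word is determined by its length alone.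
import Mathlib
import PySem

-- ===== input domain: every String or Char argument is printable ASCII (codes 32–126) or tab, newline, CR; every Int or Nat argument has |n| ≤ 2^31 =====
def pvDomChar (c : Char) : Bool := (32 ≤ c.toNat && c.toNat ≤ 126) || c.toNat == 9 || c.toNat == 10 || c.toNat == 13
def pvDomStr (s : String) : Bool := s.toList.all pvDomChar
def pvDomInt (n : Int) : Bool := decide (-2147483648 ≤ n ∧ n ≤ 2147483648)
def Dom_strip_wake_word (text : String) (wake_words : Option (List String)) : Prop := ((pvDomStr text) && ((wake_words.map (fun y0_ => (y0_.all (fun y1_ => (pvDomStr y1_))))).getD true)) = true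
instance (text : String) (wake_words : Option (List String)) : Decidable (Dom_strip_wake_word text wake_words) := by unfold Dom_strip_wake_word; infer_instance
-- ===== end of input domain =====

-- B scans candidate prefix LENGTHS downward and tests membership of the prefix in a set of wake words,
-- instead of A's sort-the-wake-words-by-length-then-scan-for-a-startswith match; objective: alternative decomposition.

-- ===== PORT A =====
-- A's for-loop with early return over the sorted list
def pvLoopA (text text_lower : String) : List String → String
  | [] => text
  | w :: t =>
    if PySem.Str.startswith text_lower w then
      PySem.Str.stripChars (PySem.Str.slice text (some (PySem.Str.len w)) none) " ,."
    else pvLoopA text text_lower t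

def strip_wake_word (text : String) (wake_words : Option (List String)) : String :=
  let ws := match wake_words with
    | none => ["hey bait", "okay bait", "ok bait", "bait"]
    | some l => l
  let text_lower := PySem.Str.strip (PySem.Str.lower text)
  pvLoopA text text_lower (PySem.List.sorted ws (fun w => PySem.Str.len w) true)

-- ===== PORT B =====
-- B's for-loop with early return over the countdown range of candidate lengths
def pvLoopB (text text_lower : String) (words : PySem.Set String) : List Int → String
  | [] => text
  | n :: t =>
    if PySem.Set.contains words (PySem.Str.slice text_lower none (some n)) then
      PySem.Str.stripChars (PySem.Str.slice text (some n) none) " ,."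
    else pvLoopB text text_lower words t

def strip_wake_word_alt (text : String) (wake_words : Option (List String)) : String :=
  let ws := wake_words.getD ["hey bait", "okay bait", "ok bait", "bait"]
  let text_lower := PySem.Str.strip (PySem.Str.lower text)
  let words := PySem.Set.ofList ws
  let longest := PySem.List.maxD (ws.map (fun w => PySem.Str.len w)) (fun x => x) 0
  pvLoopB text text_lower words
    (PySem.List.pyRange (min longest (PySem.Str.len text_lower)) (-1) (-1))

-- ===== PRECONDITION & SPEC =====
def Spec_strip_wake_word (text : String) (wake_words : Option (List String)) (out : String) : Prop := out = strip_wake_word_alt text wake_words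
instance (text : String) (wake_words : Option (List String)) (out : String) : Decidable (Spec_strip_wake_word text wake_words out) := by unfold Spec_strip_wake_word; infer_instance

-- ===== CLAIM (what is proved, stated in full; the proofs are below) =====
def Claim_equal_strip_wake_word : Prop := ∀ (text : String) (wake_words : Option (List String)), Dom_strip_wake_word text wake_words → Spec_strip_wake_word text wake_words (strip_wake_word text wake_words)

-- ===== LEMMAS AND PROOFS =====

-- A's first match in a length-nonincreasing list has the same length as the max of all matches.
lemma pvLoopA_eq_max (text tl : String) (l : List String)
    (hpw : l.Pairwise (fun a b => PySem.Str.len b ≤ PySem.Str.len a)) :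
    pvLoopA text tl l =
      match PySem.List.max? (l.filter (fun w => PySem.Str.startswith tl w)) (fun w => PySem.Str.len w) with
      | some w => PySem.Str.stripChars (PySem.Str.slice text (some (PySem.Str.len w)) none) " ,."
      | none => text := by
  induction l with
  | nil =>
    rw [List.filter_nil, (PySem.List.max?_eq_none_iff _ _).mpr rfl]
    rfl
  | cons w t ih =>
    rcases List.pairwise_cons.mp hpw with ⟨hhead, ht⟩
    by_cases hP : PySem.Str.startswith tl w = true
    · have hfil : (w :: t).filter (fun x => PySem.Str.startswith tl x) =
        w :: t.filter (fun x => PySem.Str.startswith tl x) := List.filter_cons_of_pos hP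
      rw [hfil]
      cases hmax : PySem.List.max? (w :: t.filter (fun x => PySem.Str.startswith tl x))
          (fun x => PySem.Str.len x) with
      | none =>
        exact absurd ((PySem.List.max?_eq_none_iff _ _).mp hmax) (by simp)
      | some w' =>
        have h1 : PySem.Str.len w ≤ PySem.Str.len w' :=
          PySem.List.max?_isMax hmax w (by simp)
        have h2 : PySem.Str.len w' ≤ PySem.Str.len w := by
          have hmem := PySem.List.max?_mem hmax
          rcases List.mem_cons.mp hmem with h | h
          · exact le_of_eq (by rw [h])
          · exact hhead w' (List.mem_of_mem_filter h)
        have hlen : PySem.Str.len w = PySem.Str.len w' := le_antisymm h1 h2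
        show (if PySem.Str.startswith tl w then _ else _) = _
        rw [if_pos hP, hlen]
    · have hP' : PySem.Str.startswith tl w = false := by
        simpa using hP
      have hfil : (w :: t).filter (fun x => PySem.Str.startswith tl x) =
        t.filter (fun x => PySem.Str.startswith tl x) := List.filter_cons_of_neg hP
      rw [hfil]
      show (if PySem.Str.startswith tl w then _ else _) = _
      rw [hP']
      exact (if_neg (by simp)).trans (ih ht)

-- a wake word is a match iff it is the prefix of tl of its own length
lemma pvMatch_len_le (tl w : String) (h : PySem.Str.startswith tl w = true) :
    PySem.Str.len w ≤ PySem.Str.len tl := by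
  rw [PySem.Str.startswith_eq] at h
  have := ((PySem.Chars.startswith_iff _ _).mp h).length_le
  simp [PySem.Str.len_eq]
  exact_mod_cast this

lemma pvMatch_eq_take (tl w : String) (h : PySem.Str.startswith tl w = true) :
    w.toList = tl.toList.take w.toList.length := by
  rw [PySem.Str.startswith_eq] at h
  exact (List.prefix_iff_eq_take.mp ((PySem.Chars.startswith_iff _ _).mp h))

-- B's countdown loop computes the same max-length match as A's sorted loop.
lemma pvLoopB_eq_max (text tl : String) (ws : List String) :
    ∀ (n : Nat) (a : Int), (a + 1).toNat ≤ n → a ≤ PySem.Str.len tl →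
    (∀ w ∈ ws, PySem.Str.startswith tl w = true → PySem.Str.len w ≤ a) →
    pvLoopB text tl (PySem.Set.ofList ws) (PySem.List.pyRange a (-1) (-1)) =
      match PySem.List.max? (ws.filter (fun w => PySem.Str.startswith tl w)) (fun w => PySem.Str.len w) with
      | some w => PySem.Str.stripChars (PySem.Str.slice text (some (PySem.Str.len w)) none) " ,."
      | none => text := by
  intro n
  induction n with
  | zero =>
    intro a ha _ hmax
    have hneg : a ≤ -1 := by omega
    have hfil : ws.filter (fun w => PySem.Str.startswith tl w) = [] := by
      apply List.filter_eq_nil_iff.mpr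
      intro w hw hsw
      have h1 := hmax w hw hsw
      have h0 : (0 : Int) ≤ PySem.Str.len w := by simp [PySem.Str.len_eq]
      omega
    rw [PySem.List.pyRange_neg_one_eq_nil hneg, hfil,
      (PySem.List.max?_eq_none_iff _ _).mpr rfl]
    rfl
  | succ n ih =>
    intro a ha hle hmax
    by_cases hneg : a ≤ -1
    · have hfil : ws.filter (fun w => PySem.Str.startswith tl w) = [] := by
        apply List.filter_eq_nil_iff.mpr
        intro w hw hsw
        have h1 := hmax w hw hsw
        have h0 : (0 : Int) ≤ PySem.Str.len w := by simp [PySem.Str.len_eq]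
        omega
      rw [PySem.List.pyRange_neg_one_eq_nil hneg, hfil,
        (PySem.List.max?_eq_none_iff _ _).mpr rfl]
      rfl
    · have ha0 : 0 ≤ a := by omega
      rw [PySem.List.pyRange_neg_one_cons (by omega : (-1 : Int) < a)]
      -- the prefix of tl of length a
      have hplist : (PySem.Str.slice tl none (some a)).toList = tl.toList.take a.toNat := by
        rw [PySem.Str.toList_slice]
        simp only [PySem.Chars.slice_eq_listSlice]
        exact PySem.List.slice_to tl.toList ha0
      have hplen : (PySem.Str.slice tl none (some a)).toList.length = a.toNat := by
        rw [hplist, List.length_take]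
        have : a.toNat ≤ tl.toList.length := by
          have := hle
          rw [PySem.Str.len_eq] at this
          omega
        omega
      by_cases hc : PySem.Set.contains (PySem.Set.ofList ws) (PySem.Str.slice tl none (some a)) = true
      · -- the length-a prefix is a wake word: it is a match of maximal length
        have hmem : PySem.Str.slice tl none (some a) ∈ ws := by
          have := hc
          simp [PySem.Set.contains, PySem.Set.mem_ofList] at this
          exact this
        have hsw : PySem.Str.startswith tl (PySem.Str.slice tl none (some a)) = true := by
          rw [PySem.Str.startswith_eq]
          apply (PySem.Chars.startswith_iff _ _).mpr
          rw [hplist]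
          exact List.take_prefix _ _
        have hlenp : PySem.Str.len (PySem.Str.slice tl none (some a)) = a := by
          rw [PySem.Str.len_eq, hplen]
          omega
        have hmemf : PySem.Str.slice tl none (some a) ∈
            ws.filter (fun w => PySem.Str.startswith tl w) :=
          List.mem_filter.mpr ⟨hmem, hsw⟩
        cases hm : PySem.List.max? (ws.filter (fun w => PySem.Str.startswith tl w))
            (fun w => PySem.Str.len w) with
        | none =>
          rw [PySem.List.max?_eq_none_iff] at hm
          rw [hm] at hmemf
          exact absurd hmemf (by simp)
        | some w' =>
          have h1 : a ≤ PySem.Str.len w' := by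
            have := PySem.List.max?_isMax hm _ hmemf
            rw [hlenp] at this
            exact this
          have h2 : PySem.Str.len w' ≤ a := by
            have hmem' := PySem.List.max?_mem hm
            rcases List.mem_filter.mp hmem' with ⟨hw', hsw'⟩
            exact hmax w' hw' hsw'
          have : PySem.Str.len w' = a := le_antisymm h2 h1
          show (if PySem.Set.contains _ _ then _ else _) = _
          rw [if_pos hc]
          show PySem.Str.stripChars (PySem.Str.slice text (some a) none) " ,." =
            PySem.Str.stripChars (PySem.Str.slice text (some (PySem.Str.len w')) none) " ,."
          rw [this]
      · -- no wake word of length a matches; every match has length ≤ a - 1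
        have hmax' : ∀ w ∈ ws, PySem.Str.startswith tl w = true → PySem.Str.len w ≤ a - 1 := by
          intro w hw hsw
          have h1 := hmax w hw hsw
          by_contra hgt
          have heq : PySem.Str.len w = a := by omega
          have hwl : w.toList.length = a.toNat := by
            rw [PySem.Str.len_eq] at heq
            omega
          have : w = PySem.Str.slice tl none (some a) := by
            apply String.toList_inj.mp
            rw [hplist, pvMatch_eq_take tl w hsw, hwl]
          rw [this] at hw
          have : PySem.Set.contains (PySem.Set.ofList ws) (PySem.Str.slice tl none (some a)) = true := by
            simp [PySem.Set.contains, PySem.Set.mem_ofList]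
            exact hw
          exact hc this
        show (if PySem.Set.contains _ _ then _ else _) = _
        rw [if_neg hc]
        exact ih (a - 1) (by omega) (by omega) hmax'

-- The shared core: A's loop over the sorted list equals B's countdown loop, for any wake-word list.
lemma pvMain (text : String) (ws : List String) :
    pvLoopA text (PySem.Str.strip (PySem.Str.lower text))
        (PySem.List.sorted ws (fun w => PySem.Str.len w) true) =
      pvLoopB text (PySem.Str.strip (PySem.Str.lower text)) (PySem.Set.ofList ws)
        (PySem.List.pyRange
          (min (PySem.List.maxD (ws.map (fun w => PySem.Str.len w)) (fun x => x) 0)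
               (PySem.Str.len (PySem.Str.strip (PySem.Str.lower text)))) (-1) (-1)) := by
  set tl := PySem.Str.strip (PySem.Str.lower text) with htl
  set M := min (PySem.List.maxD (ws.map (fun w => PySem.Str.len w)) (fun x => x) 0)
      (PySem.Str.len tl) with hM
  -- B's side equals the max-of-matches reference
  have hB := pvLoopB_eq_max text tl ws (M + 1).toNat M (le_refl _) (min_le_right _ _)
    (by
      intro w hw hsw
      have h1 : PySem.Str.len w ≤ PySem.List.maxD (ws.map (fun w => PySem.Str.len w)) (fun x => x) 0 :=
        PySem.List.le_maxD_id _ 0 _ (List.mem_map_of_mem hw)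
      have h2 : PySem.Str.len w ≤ PySem.Str.len tl := pvMatch_len_le tl w hsw
      exact le_min h1 h2)
  -- A's side equals the same reference, after transporting the filter through the sorting permutation
  rw [hB, pvLoopA_eq_max text tl _ (PySem.List.sorted_pairwise_rev ws (fun w => PySem.Str.len w))]
  have hperm : ((PySem.List.sorted ws (fun w => PySem.Str.len w) true).filter
      (fun w => PySem.Str.startswith tl w)).Perm
      (ws.filter (fun w => PySem.Str.startswith tl w)) :=
    (PySem.List.sorted_perm ws (fun w => PySem.Str.len w) true).filter _
  cases h1 : PySem.List.max? ((PySem.List.sorted ws (fun w => PySem.Str.len w) true).filter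
      (fun w => PySem.Str.startswith tl w)) (fun w => PySem.Str.len w) with
  | none =>
    cases h2 : PySem.List.max? (ws.filter (fun w => PySem.Str.startswith tl w))
        (fun w => PySem.Str.len w) with
    | none => rfl
    | some w₂ =>
      have e1 := (PySem.List.max?_eq_none_iff _ _).mp h1
      have e2 : ws.filter (fun w => PySem.Str.startswith tl w) = [] := by
        have := hperm.length_eq
        rw [e1] at this
        exact List.eq_nil_of_length_eq_zero this.symm
      rw [(PySem.List.max?_eq_none_iff _ _).mpr e2] at h2
      exact absurd h2 (by simp)
  | some w₁ =>
    cases h2 : PySem.List.max? (ws.filter (fun w => PySem.Str.startswith tl w))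
        (fun w => PySem.Str.len w) with
    | none =>
      have e2 := (PySem.List.max?_eq_none_iff _ _).mp h2
      have e1 : (PySem.List.sorted ws (fun w => PySem.Str.len w) true).filter
          (fun w => PySem.Str.startswith tl w) = [] := by
        have := hperm.length_eq
        rw [e2] at this
        exact List.eq_nil_of_length_eq_zero this
      rw [(PySem.List.max?_eq_none_iff _ _).mpr e1] at h1
      exact absurd h1 (by simp)
    | some w₂ =>
      have hm1 : w₁ ∈ ws.filter (fun w => PySem.Str.startswith tl w) :=
        hperm.mem_iff.mp (PySem.List.max?_mem h1)
      have hm2 : w₂ ∈ (PySem.List.sorted ws (fun w => PySem.Str.len w) true).filter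
          (fun w => PySem.Str.startswith tl w) :=
        hperm.mem_iff.mpr (PySem.List.max?_mem h2)
      have hle1 : PySem.Str.len w₁ ≤ PySem.Str.len w₂ := PySem.List.max?_isMax h2 w₁ hm1
      have hle2 : PySem.Str.len w₂ ≤ PySem.Str.len w₁ := PySem.List.max?_isMax h1 w₂ hm2
      have hlen : PySem.Str.len w₁ = PySem.Str.len w₂ := le_antisymm hle1 hle2
      show PySem.Str.stripChars (PySem.Str.slice text (some (PySem.Str.len w₁)) none) " ,." = _
      rw [hlen]

-- ===== VERDICT (by name: the statement is the Claim_ definition above) =====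
theorem strip_wake_word_spec : Claim_equal_strip_wake_word := by
  intro text wake_words _
  unfold Spec_strip_wake_word
  cases wake_words with
  | none =>
    simp only [strip_wake_word, strip_wake_word_alt, Option.getD]
    exact pvMain text ["hey bait", "okay bait", "ok bait", "bait"]
  | some ws =>
    simp only [strip_wake_word, strip_wake_word_alt, Option.getD]
    exact pvMain text ws
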